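-- pv_equiv track=rewrite | github.com/crapas1974/algo2 | datastructure/list_segmentation.py | counts_per_segment
-- ===== SOURCE A (Python) =====
-- def counts_per_segment(arr):
--     segment_count = {}
--     for outer_list in arr:
--         for inner_list in outer_list:
--             inner_list_tuple = tuple(inner_list)
--             if inner_list_tuple not in segment_count:
--                 segment_count[inner_list_tuple] = 0
--             segment_count[inner_list_tuple] += 1
--
--
--
--     segment_count = dict(sorted(segment_count.items(), key=lambda x: x[1], reverse=True))
--     return segment_count
-- ===== SOURCE B (Python) =====
-- def counts_per_segment(arr):
--     segment_count = {}
--     for outer_list in arr: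
--         for inner_list in outer_list:
--             t = tuple(inner_list)
--             segment_count[t] = segment_count.get(t, 0) + 1
--     buckets = {}
--     for key, count in segment_count.items():
--         buckets.setdefault(count, []).append(key)
--     result = {}
--     for count in range(max(buckets, default=0), 0, -1):
--         for key in buckets.get(count, []):
--             result[key] = count
--     return result
-- ===== Notes on version B (the rewrite author's own statement) =====
-- stated objective: alternative
-- what changed: Replaces the comparison sort of the (key,count) items by a bucket/counting sort: counts are grouped into buckets keyed by count, then the result dict is emitted by walking counts from the maximum down to 1, reproducing the stable descending order.
import Mathlib
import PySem

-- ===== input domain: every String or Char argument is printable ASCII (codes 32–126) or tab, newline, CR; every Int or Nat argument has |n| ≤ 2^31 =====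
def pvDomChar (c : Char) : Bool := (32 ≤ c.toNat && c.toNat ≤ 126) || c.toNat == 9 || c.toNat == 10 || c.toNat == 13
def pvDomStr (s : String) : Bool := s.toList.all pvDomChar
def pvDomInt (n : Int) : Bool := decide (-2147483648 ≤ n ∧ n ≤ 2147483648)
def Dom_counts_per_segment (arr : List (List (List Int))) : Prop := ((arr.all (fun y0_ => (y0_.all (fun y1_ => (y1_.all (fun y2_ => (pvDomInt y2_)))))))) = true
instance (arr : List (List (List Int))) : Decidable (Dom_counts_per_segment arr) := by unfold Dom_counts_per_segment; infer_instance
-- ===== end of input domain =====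

-- B replaces the comparison sort by count (descending, stable) with a bucket/counting
-- sort over the counts; same return value, the equivalence below is exact.

-- ===== PORT A =====
def counts_per_segment (arr : List (List (List Int))) : List (List Int × Int) :=
  let segment_count : PySem.Dict (List Int) Int :=
    arr.foldl (fun sc outer_list =>
      outer_list.foldl (fun sc inner_list =>
        let sc := if sc.contains inner_list then sc else sc.insert inner_list 0
        sc.insert inner_list (sc.getD inner_list 0 + 1)) sc) PySem.Dict.empty
  (PySem.Dict.ofList (PySem.List.sorted segment_count.items (fun x => x.2) true)).items

-- ===== PORT B =====
def counts_per_segment_alt (arr : List (List (List Int))) : List (List Int × Int) :=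
  let segment_count : PySem.Dict (List Int) Int :=
    arr.foldl (fun sc outer_list =>
      outer_list.foldl (fun sc inner_list =>
        sc.insert inner_list (sc.getD inner_list 0 + 1)) sc) PySem.Dict.empty
  let buckets : PySem.Dict Int (List (List Int)) :=
    segment_count.items.foldl (fun b p => b.modify p.2 [] (fun l => l ++ [p.1])) PySem.Dict.empty
  let maxc : Int := PySem.List.maxD buckets.keys (fun c => c) 0
  let result : PySem.Dict (List Int) Int :=
    (PySem.List.pyRange maxc 0 (-1)).foldl (fun r c =>
      (buckets.getD c []).foldl (fun r k => r.insert k c) r) PySem.Dict.empty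
  result.items

-- ===== PRECONDITION & SPEC =====
def Spec_counts_per_segment (arr : List (List (List Int))) (out : List (List Int × Int)) : Prop := out = counts_per_segment_alt arr
instance (arr : List (List (List Int))) (out : List (List Int × Int)) : Decidable (Spec_counts_per_segment arr out) := by unfold Spec_counts_per_segment; infer_instance

-- ===== CLAIM (what is proved, stated in full; the proofs are below) =====
def Claim_equal_counts_per_segment : Prop := ∀ (arr : List (List (List Int))), Dom_counts_per_segment arr → Spec_counts_per_segment arr (counts_per_segment arr)


-- ===== LEMMAS AND PROOFS =====

-- canonical bucket form shared by both proofs: groups of equal count, counts descending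
def pvCanon (items : List (List Int × Int)) : List (List Int × Int) :=
  (PySem.List.pyRange (PySem.List.maxD (PySem.Set.ofList (items.map (fun p => p.2))) (fun c => c) 0) 0 (-1)).flatMap
    (fun c => items.filter (fun p => p.2 == c))

-- insertBy walks past elements it does not insert before
theorem pv_insertBy_skip {a : Type} (before : a -> a -> Bool) (x : a) (as bs : List a)
    (h : forall y, y ∈ as -> before x y = false) :
    PySem.List.insertBy before x (as ++ bs) = as ++ PySem.List.insertBy before x bs := by
  induction as with
  | nil => rfl
  | cons y ys ih =>
    simp only [List.cons_append, PySem.List.insertBy, h y (by simp)]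
    simp only [Bool.false_eq_true, if_false, List.cons.injEq, true_and]
    exact ih (fun z hz => h z (by simp [hz]))

theorem pv_insertBy_front {a : Type} (before : a -> a -> Bool) (x : a) (bs : List a)
    (h : forall y, y ∈ bs -> before x y = true) :
    PySem.List.insertBy before x bs = x :: bs := by
  cases bs with
  | nil => rfl
  | cons y ys => simp [PySem.List.insertBy, h y (by simp)]

-- inserting x into a flatten of key-homogeneous groups with strictly descending keys
theorem pv_insertBy_buckets {a : Type} (key : a -> Int) (x : a) (cs : List Int) (g : Int -> List a)
    (hcs : cs.Pairwise (· > ·)) (hx : key x ∈ cs)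
    (hg : forall c, c ∈ cs -> forall p, p ∈ g c -> key p = c) :
    PySem.List.insertBy (fun s t => decide (key t < key s)) x (cs.flatMap g)
      = cs.flatMap (fun c => if key x = c then g c ++ [x] else g c) := by
  induction cs with
  | nil => simp at hx
  | cons c cs ih =>
    rw [List.pairwise_cons] at hcs
    obtain ⟨hhead, htail⟩ := hcs
    simp only [List.flatMap_cons]
    by_cases hxc : key x = c
    · rw [pv_insertBy_skip _ _ _ _ (fun y hy => by
        have := hg c (by simp) y hy
        simp [this, hxc])]
      rw [pv_insertBy_front _ _ _ (fun y hy => by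
        obtain ⟨c', hc', hy'⟩ := List.mem_flatMap.1 hy
        have hk := hg c' (by simp [hc']) y hy'
        have := hhead c' hc'
        simp [hk, hxc]; omega)]
      rw [if_pos hxc]
      have : cs.flatMap (fun c' => if key x = c' then g c' ++ [x] else g c') = cs.flatMap g := by
        rw [List.flatMap_def, List.flatMap_def]
        congr 1
        apply List.map_congr_left
        intro c' hc'
        have := hhead c' hc'
        rw [if_neg (by omega)]
      rw [this]
      simp
    · have hxcs : key x ∈ cs := by
        rcases List.mem_cons.1 hx with h | h
        · exact absurd h hxc
        · exact h
      rw [pv_insertBy_skip _ _ _ _ (fun y hy => by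
        have hk := hg c (by simp) y hy
        obtain ⟨c2, hc2, rfl⟩ : ∃ c2, c2 ∈ cs ∧ key x = c2 := ⟨key x, hxcs, rfl⟩
        have := hhead _ hc2
        simp [hk]; omega)]
      rw [ih htail hxcs (fun c' hc' p hp => hg c' (by simp [hc']) p hp), if_neg hxc]

-- the stable descending sort is the flatten of its count-buckets
theorem pv_sorted_eq_buckets {a : Type} (key : a -> Int) (l : List a) (cs : List Int)
    (hcs : cs.Pairwise (· > ·)) (hmem : forall p, p ∈ l -> key p ∈ cs) :
    PySem.List.sorted l key true = cs.flatMap (fun c => l.filter (fun p => key p == c)) := by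
  induction l using List.reverseRecOn with
  | nil => simp [PySem.List.sorted]
  | append_singleton l x ih =>
    rw [PySem.List.sorted_rev_eq_foldl_insertBy, List.foldl_append, List.foldl_cons, List.foldl_nil,
        ← PySem.List.sorted_rev_eq_foldl_insertBy]
    rw [ih (fun p hp => hmem p (by simp [hp]))]
    rw [pv_insertBy_buckets key x cs _ hcs (hmem x (by simp))
        (fun c hc p hp => by
          have := (List.mem_filter.1 hp).2
          exact beq_iff_eq.1 this)]
    rw [List.flatMap_def, List.flatMap_def]
    congr 1
    apply List.map_congr_left
    intro c hc
    by_cases h : key x = c <;> simp [h, List.filter_append]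

-- both counting loops build Counter(arr.flatten)
theorem pv_count_eq_alt (arr : List (List (List Int))) :
    arr.foldl (fun sc outer_list => outer_list.foldl
        (fun sc inner_list => sc.insert inner_list (sc.getD inner_list 0 + 1)) sc) PySem.Dict.empty
      = PySem.Dict.counter arr.flatten := by
  rw [← List.foldl_flatten, PySem.Dict.foldl_insert_getD_add_one_eq_counter]

theorem pv_count_eq (arr : List (List (List Int))) :
    arr.foldl (fun sc outer_list => outer_list.foldl
        (fun sc inner_list =>
          let sc := if sc.contains inner_list then sc else sc.insert inner_list 0
          sc.insert inner_list (sc.getD inner_list 0 + 1)) sc) PySem.Dict.empty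
      = PySem.Dict.counter arr.flatten := by
  rw [← List.foldl_flatten, ← PySem.Dict.foldl_insert_getD_add_one_eq_counter]
  apply PySem.List.foldl_congr_mem
  intro sc t ht
  by_cases hc : sc.contains t
  · simp [hc]
  · simp only [hc, Bool.false_eq_true, if_false]
    rw [PySem.Dict.getD_insert_self, PySem.Dict.insert_insert_self,
        PySem.Dict.getD_of_not_contains _ _ (Bool.eq_false_iff.mpr hc)]

-- the bucket dict groups keys by count, in item order
theorem pv_buckets_getD (items : List (List Int × Int)) (c : Int) :
    (items.foldl (fun b p => b.modify p.2 [] (fun l => l ++ [p.1])) PySem.Dict.empty).getD c []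
      = (items.filter (fun p => p.2 == c)).map (fun p => p.1) := by
  have h : items.foldl (fun b p => b.modify p.2 [] (fun l => l ++ [p.1])) PySem.Dict.empty
      = (items.map (fun p => (p.2, p.1))).foldl
          (fun b q => b.modify q.1 [] (fun l => l ++ [q.2])) PySem.Dict.empty := by
    rw [List.foldl_map]
  rw [h, PySem.Dict.getD_foldl_modify_append, PySem.Dict.getD_empty]
  simp [List.filter_map, List.map_map, Function.comp_def]

theorem pv_buckets_keys (items : List (List Int × Int)) :
    (items.foldl (fun b p => b.modify p.2 [] (fun l => l ++ [p.1])) PySem.Dict.empty).keys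
      = PySem.Set.ofList (items.map (fun p => p.2)) := by
  rw [PySem.Dict.keys_foldl_modify_key items (fun p => p.2) [] (fun _ p => fun l => l ++ [p.1])]
  rfl

-- emitting disjoint groups of fresh keys into a dict appends their pairs
theorem pv_foldl_insert_groups (cs : List Int) (g : Int -> List (List Int)) (r : PySem.Dict (List Int) Int)
    (hn : (cs.flatMap g).Nodup)
    (hfresh : forall c, c ∈ cs -> forall k, k ∈ g c -> r.contains k = false) :
    (cs.foldl (fun r c => (g c).foldl (fun r k => r.insert k c) r) r).items
      = r.items ++ cs.flatMap (fun c => (g c).map (fun k => (k, c))) := by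
  induction cs generalizing r with
  | nil => simp
  | cons c cs ih =>
    simp only [List.flatMap_cons] at hn ⊢
    have hnc : (g c).Nodup := hn.of_append_left
    have hdisj : List.Disjoint (g c) (cs.flatMap g) := List.disjoint_of_nodup_append hn
    have h1 : ((g c).foldl (fun r k => r.insert k c) r).items
        = r.items ++ (g c).map (fun k => (k, c)) :=
      PySem.Dict.items_foldl_insert_fresh (g c) (fun k => k) (fun _ => c) r
        (fun k hk => hfresh c (by simp) k hk) (by simpa using hnc)
    have hkeys : ((g c).foldl (fun r k => r.insert k c) r).keys
        = PySem.Set.update r.keys (g c) :=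
      PySem.Dict.keys_foldl_insert (g c) (fun _ _ => c) r
    rw [List.foldl_cons, ih _ hn.of_append_right ?_, h1, List.append_assoc]
    intro c' hc' k hk
    have hmemflat : k ∈ cs.flatMap g := List.mem_flatMap.2 ⟨c', hc', hk⟩
    have hnotr : k ∉ r.keys := fun hm => by
      have := (PySem.Dict.contains_iff_mem_keys _ _).2 hm
      rw [hfresh c' (by simp [hc']) k hk] at this
      exact Bool.false_ne_true this
    have hnotg : k ∉ g c := fun hm => hdisj hm hmemflat
    have : k ∉ ((g c).foldl (fun r k => r.insert k c) r).keys := by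
      rw [hkeys, PySem.Set.mem_update]
      rintro (h | h)
      · exact hnotr h
      · exact hnotg h
    cases h : ((g c).foldl (fun r k => r.insert k c) r).contains k with
    | false => rfl
    | true => exact absurd ((PySem.Dict.contains_iff_mem_keys _ _).1 h) this

-- the groups of a keys-nodup item list are pairwise disjoint and individually nodup
theorem pv_flatMap_groups_nodup (cs : List Int) (items : List (List Int × Int))
    (hcs : cs.Nodup) (hitems : (items.map (fun p => p.1)).Nodup) :
    (cs.flatMap (fun c => (items.filter (fun p => p.2 == c)).map (fun p => p.1))).Nodup := by
  rw [List.flatMap_def, List.nodup_flatten]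
  constructor
  · intro l hl
    obtain ⟨c, hc, rfl⟩ := List.mem_map.1 hl
    exact ((List.filter_sublist (l := items) (p := fun p => p.2 == c)).map (fun p => p.1)).nodup hitems
  · rw [List.pairwise_map]
    refine hcs.imp ?_
    intro c c' hne k hk hk'
    obtain ⟨p, hp, hp1⟩ := List.mem_map.1 hk
    obtain ⟨q, hq, hq1⟩ := List.mem_map.1 hk'
    have hpeq : p = q := List.inj_on_of_nodup_map hitems (List.mem_of_mem_filter hp)
      (List.mem_of_mem_filter hq) (by rw [hp1, hq1])
    have h1 : p.2 = c := beq_iff_eq.1 (List.mem_filter.1 hp).2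
    have h2 : q.2 = c' := beq_iff_eq.1 (List.mem_filter.1 hq).2
    exact hne (by rw [← h1, hpeq, h2])

-- descending range facts
theorem pv_pyRange_down_pairwise (m : Int) : (PySem.List.pyRange m 0 (-1)).Pairwise (· > ·) := by
  rw [PySem.List.pyRange_neg_one]
  rw [List.pairwise_map]
  exact (List.pairwise_lt_range).imp (fun h => by omega)

theorem pv_mem_pyRange_down (m x : Int) (h1 : 0 < x) (h2 : x ≤ m) :
    x ∈ PySem.List.pyRange m 0 (-1) := by
  rw [PySem.List.mem_pyRange_iff_of_neg (by norm_num)]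
  exact ⟨h1, h2, ⟨m - x, by ring⟩⟩

-- facts about the counter's item list
theorem pv_items_keys_nodup (l : List (List Int)) :
    ((PySem.Dict.counter l).items.map (fun p => p.1)).Nodup := by
  have := PySem.Dict.nodup_keys_counter (κ := List Int) l
  simpa [PySem.Dict.keys] using this

theorem pv_items_pos (l : List (List Int)) (p : List Int × Int)
    (hp : p ∈ (PySem.Dict.counter l).items) : 0 < p.2 := by
  rw [PySem.Dict.items_counter] at hp
  obtain ⟨k, hk, rfl⟩ := List.mem_map.1 hp
  have hkl : k ∈ l := (PySem.Set.mem_ofList _ _).1 hk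
  have : 0 < l.count k := List.count_pos_iff.2 hkl
  simpa using this

theorem pv_items_le_maxD (items : List (List Int × Int)) (p : List Int × Int) (hp : p ∈ items) :
    p.2 ≤ PySem.List.maxD (PySem.Set.ofList (items.map (fun q => q.2))) (fun c => c) 0 := by
  have hmem : p.2 ∈ PySem.Set.ofList (items.map (fun q => q.2)) :=
    (PySem.Set.mem_ofList _ _).2 (List.mem_map.2 ⟨p, hp, rfl⟩)
  unfold PySem.List.maxD
  cases hmax : PySem.List.max? (PySem.Set.ofList (items.map (fun q => q.2))) (fun c => c) with
  | none =>
    rw [PySem.List.max?_eq_none_iff] at hmax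
    rw [hmax] at hmem
    simp at hmem
  | some m =>
    simpa using PySem.List.max?_isMax hmax p.2 hmem

theorem pv_group_pairs (items : List (List Int × Int)) (c : Int) :
    (((items.filter (fun p => p.2 == c)).map (fun p => p.1)).map (fun k => (k, c)))
      = items.filter (fun p => p.2 == c) := by
  rw [List.map_map]
  have h : forall p, p ∈ items.filter (fun p => p.2 == c) ->
      ((fun k => (k, c)) ∘ fun p => p.1) p = id p := by
    intro p hp
    have : p.2 = c := beq_iff_eq.1 (List.mem_filter.1 hp).2
    simp [Function.comp, ← this]
  rw [List.map_congr_left h, List.map_id]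

-- a dict built from a keys-nodup pair list lists exactly those pairs
theorem pv_items_ofList (ps : List (List Int × Int)) (h : (ps.map (fun p => p.1)).Nodup) :
    (PySem.Dict.ofList ps).items = ps := by
  have := PySem.Dict.items_foldl_insert_fresh ps (fun p => p.1) (fun p => p.2)
    (PySem.Dict.empty (κ := List Int) (ν := Int)) (fun p _ => PySem.Dict.contains_empty _) h
  simpa [PySem.Dict.ofList, PySem.Dict.update] using this

theorem pv_A_eq (arr : List (List (List Int))) :
    counts_per_segment arr = pvCanon ((PySem.Dict.counter arr.flatten).items) := by
  have hkn := pv_items_keys_nodup arr.flatten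
  simp only [counts_per_segment, pv_count_eq]
  rw [pv_items_ofList]
  · unfold pvCanon
    exact pv_sorted_eq_buckets (fun p => p.2) _ _
      (pv_pyRange_down_pairwise _)
      (fun p hp => pv_mem_pyRange_down _ _ (pv_items_pos _ p hp) (pv_items_le_maxD _ p hp))
  · have hperm := PySem.List.sorted_perm (PySem.Dict.counter arr.flatten).items
      (fun p : List Int × Int => p.2) true
    exact ((hperm.map (fun p => p.1)).nodup_iff).2 hkn

theorem pv_B_eq (arr : List (List (List Int))) :
    counts_per_segment_alt arr = pvCanon ((PySem.Dict.counter arr.flatten).items) := by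
  have hkn := pv_items_keys_nodup arr.flatten
  simp only [counts_per_segment_alt, pv_count_eq_alt]
  simp only [pv_buckets_keys, pv_buckets_getD]
  rw [pv_foldl_insert_groups _
        (fun c => ((PySem.Dict.counter arr.flatten).items.filter (fun p => p.2 == c)).map
          (fun p => p.1)) _
        (pv_flatMap_groups_nodup _ _
          ((pv_pyRange_down_pairwise _).imp (fun h => ne_of_gt h)) hkn)
        (fun c _ k _ => PySem.Dict.contains_empty k)]
  simp only [pv_group_pairs]
  unfold pvCanon
  rfl

-- ===== VERDICT (by name: the statement is the Claim_ definition above) =====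
theorem counts_per_segment_spec : Claim_equal_counts_per_segment := by
  intro arr _
  unfold Spec_counts_per_segment
  rw [pv_A_eq, pv_B_eq]
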